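-- pv_equiv track=rewrite | github.com/victorzhang-mars/haplotype_phasing_bioinfomatics | code.py | phaseGenotypeRecurse
-- ===== SOURCE A (Python) =====
-- def phaseGenotypeRecurse(genotype, i):
--     if i == 0:
--         if genotype[i] == 2:
--             return [[1]]
--         elif genotype[i] == 0:
--             return [[0]]
--         else:
--             return [[1], [0]]
--     elif i < 0:
--         raise ValueError("Reached a negative index value in phaseGenotypeRecurse()")
--
--     precedingPhases = phaseGenotypeRecurse(genotype, i-1)
--
--
--     currentSNP = genotype[i]
--     phases = []
--     if (currentSNP == 2):
--         for haplotype in range(0, len(precedingPhases)):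
--             newPhase = precedingPhases[haplotype]
--             newPhase.append(1)
--             phases.append(newPhase)
--
--     elif (currentSNP == 0):
--         for haplotype in range(0, len(precedingPhases)):
--             newPhase = precedingPhases[haplotype]
--             newPhase.append(0)
--             phases.append(newPhase)
--
--     elif (currentSNP == 1):
--         for haplotype in range(0, len(precedingPhases)):
--             phase1 = list(precedingPhases[haplotype])
--             phase1.append(1)
--             phase2 = precedingPhases[haplotype]
--             phase2.append(0)
--             phases.append(phase1)
--             phases.append(phase2)
--     else:
--         raise ValueError("Genotype at index " + str(i)
--                          + " is not a valid symbol from the set {0, 1, 2}! "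
--                            "Check that the provided genotype is correct. "
--                            "Error in phaseGenotypeRecurse().")
--     return phases
-- ===== SOURCE B (Python) =====
-- def phaseGenotypeRecurse(genotype, i):
--     if i < 0:
--         raise ValueError("Reached a negative index value in phaseGenotypeRecurse()")
--     g0 = genotype[0]
--     phases = [[1]] if g0 == 2 else [[0]] if g0 == 0 else [[1], [0]]
--     for j in range(1, i + 1):
--         s = genotype[j]
--         if s == 2:
--             phases = [h + [1] for h in phases]
--         elif s == 0:
--             phases = [h + [0] for h in phases]
--         elif s == 1:
--             phases = [e for h in phases for e in (h + [1], h + [0])]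
--         else:
--             raise ValueError("Genotype at index " + str(j)
--                              + " is not a valid symbol from the set {0, 1, 2}! "
--                                "Check that the provided genotype is correct. "
--                                "Error in phaseGenotypeRecurse().")
--     return phases
-- ===== Notes on version B (the rewrite author's own statement) =====
-- stated objective: simpler
-- what changed: Replaced the recursion on i (which rebuilds the call stack and mutates/appends to shared sublists) with a single iterative bottom-up loop over indices 1..i that rebuilds the phase list with comprehensions each step.
import Mathlib
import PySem

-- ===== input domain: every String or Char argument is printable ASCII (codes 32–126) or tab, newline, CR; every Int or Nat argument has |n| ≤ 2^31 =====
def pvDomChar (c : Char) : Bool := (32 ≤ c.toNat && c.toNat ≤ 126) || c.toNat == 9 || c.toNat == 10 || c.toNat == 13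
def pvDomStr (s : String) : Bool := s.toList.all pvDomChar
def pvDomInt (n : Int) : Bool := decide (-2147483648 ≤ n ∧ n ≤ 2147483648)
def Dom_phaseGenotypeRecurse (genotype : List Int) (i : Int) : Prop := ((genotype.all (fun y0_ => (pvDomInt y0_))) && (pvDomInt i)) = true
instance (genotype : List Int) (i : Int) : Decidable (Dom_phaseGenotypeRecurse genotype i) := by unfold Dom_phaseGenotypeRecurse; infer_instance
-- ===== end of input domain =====

-- B replaces A's recursion on i by one bottom-up loop over indices 1..i (simpler: no call stack,
-- no shared-list mutation); equivalence of the RETURN value is proved on Pre_ (A mutates no argument).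

-- ===== PORT A =====
-- A recurses on i-1; we transliterate via the Nat measure i.toNat (A raises on i < 0 — excluded by Pre_;
-- the port returns [] exactly where the Python raises: negative i, index out of range, invalid symbol).
def phaseGenotypeRecurseGo (genotype : List Int) : Nat → List (List Int)
  | 0 =>
    match PySem.List.pyGet? genotype 0 with
    | none => []  -- IndexError
    | some g => if g = 2 then [[1]] else if g = 0 then [[0]] else [[1], [0]]
  | n + 1 =>
    let precedingPhases := phaseGenotypeRecurseGo genotype n
    match PySem.List.pyGet? genotype ((n : Int) + 1) with
    | none => []  -- IndexError
    | some currentSNP =>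
      if currentSNP = 2 then
        precedingPhases.foldl (fun phases h => phases ++ [h ++ [1]]) []
      else if currentSNP = 0 then
        precedingPhases.foldl (fun phases h => phases ++ [h ++ [0]]) []
      else if currentSNP = 1 then
        precedingPhases.foldl (fun phases h => phases ++ [h ++ [1], h ++ [0]]) []
      else []  -- ValueError

def phaseGenotypeRecurse (genotype : List Int) (i : Int) : List (List Int) :=
  if i < 0 then []  -- ValueError
  else phaseGenotypeRecurseGo genotype i.toNat

-- ===== PORT B =====
-- One fold over range(1, i+1), rebuilding the phase list each step ([] marks where Source B raises;
-- under Pre_ those branches are never taken).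
def phaseGenotypeRecurse_alt (genotype : List Int) (i : Int) : List (List Int) :=
  if i < 0 then []  -- ValueError
  else
    match PySem.List.pyGet? genotype 0 with
    | none => []  -- IndexError
    | some g0 =>
      let init := if g0 = 2 then [[(1:Int)]] else if g0 = 0 then [[0]] else [[1], [0]]
      (PySem.List.pyRange 1 (i + 1) 1).foldl
        (fun phases j =>
          match PySem.List.pyGet? genotype j with
          | none => []  -- IndexError
          | some s =>
            if s = 2 then phases.map (fun h => h ++ [1])
            else if s = 0 then phases.map (fun h => h ++ [0])
            else if s = 1 then phases.flatMap (fun h => [h ++ [1], h ++ [0]])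
            else [])  -- ValueError
        init

-- ===== PRECONDITION & SPEC =====
-- Pre_ excludes exactly the inputs where A raises: i < 0 (ValueError), i ≥ len (IndexError),
-- or an invalid symbol at an index 1..i (ValueError). Index 0 may hold any value (A accepts it).
def Pre_phaseGenotypeRecurse (genotype : List Int) (i : Int) : Prop :=
  0 ≤ i ∧ i < genotype.length ∧
    ∀ j ∈ List.range (i.toNat + 1), j = 0 ∨
      genotype.getD j 0 = 0 ∨ genotype.getD j 0 = 1 ∨ genotype.getD j 0 = 2
instance (genotype : List Int) (i : Int) : Decidable (Pre_phaseGenotypeRecurse genotype i) := by unfold Pre_phaseGenotypeRecurse; infer_instance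

def pvWitness_phaseGenotypeRecurse : List Int × Int := ([1, 0, 2, 1], 3)

def Spec_phaseGenotypeRecurse (genotype : List Int) (i : Int) (out : List (List Int)) : Prop := out = phaseGenotypeRecurse_alt genotype i
instance (genotype : List Int) (i : Int) (out : List (List Int)) : Decidable (Spec_phaseGenotypeRecurse genotype i out) := by unfold Spec_phaseGenotypeRecurse; infer_instance

-- ===== CLAIM (what is proved, stated in full; the proofs are below) =====
def Claim_equal_phaseGenotypeRecurse : Prop := ∀ (genotype : List Int) (i : Int), Dom_phaseGenotypeRecurse genotype i → Pre_phaseGenotypeRecurse genotype i → Spec_phaseGenotypeRecurse genotype i (phaseGenotypeRecurse genotype i)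

-- ===== LEMMAS AND PROOFS =====

-- the step function of B's fold, named for the induction
def pvStepB (genotype : List Int) (phases : List (List Int)) (j : Int) : List (List Int) :=
  match PySem.List.pyGet? genotype j with
  | none => []
  | some s =>
    if s = 2 then phases.map (fun h => h ++ [1])
    else if s = 0 then phases.map (fun h => h ++ [0])
    else if s = 1 then phases.flatMap (fun h => [h ++ [1], h ++ [0]])
    else []

lemma phaseGenotypeRecurse_alt_eq_fold (genotype : List Int) (i : Int) (hi : ¬ i < 0)
    (g0 : Int) (h0 : PySem.List.pyGet? genotype 0 = some g0) :
    phaseGenotypeRecurse_alt genotype i =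
      (PySem.List.pyRange 1 (i + 1) 1).foldl (pvStepB genotype)
        (if g0 = 2 then [[(1:Int)]] else if g0 = 0 then [[0]] else [[1], [0]]) := by
  simp only [phaseGenotypeRecurse_alt, hi, if_false, h0]
  rfl

-- core induction: for every n < len with valid symbols at 1..n, A's recursion equals B's fold
lemma pvMain (genotype : List Int) (n : Nat) (hlen : n < genotype.length)
    (hsym : ∀ j : Nat, 1 ≤ j → j ≤ n →
      genotype.getD j 0 = 0 ∨ genotype.getD j 0 = 1 ∨ genotype.getD j 0 = 2) :
    phaseGenotypeRecurseGo genotype n =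
      (PySem.List.pyRange 1 ((n : Int) + 1) 1).foldl (pvStepB genotype)
        (match PySem.List.pyGet? genotype 0 with
         | none => []
         | some g => if g = 2 then [[1]] else if g = 0 then [[0]] else [[1], [0]]) := by
  induction n with
  | zero =>
    simp [phaseGenotypeRecurseGo, PySem.List.pyRange_one_eq_nil (a := 1) (b := 1) le_rfl]
  | succ n ih =>
    have hlen' : n < genotype.length := Nat.lt_of_succ_lt hlen
    have hsym' : ∀ j : Nat, 1 ≤ j → j ≤ n →
        genotype.getD j 0 = 0 ∨ genotype.getD j 0 = 1 ∨ genotype.getD j 0 = 2 :=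
      fun j h1 h2 => hsym j h1 (Nat.le_succ_of_le h2)
    have hrange : PySem.List.pyRange 1 (((n : Nat) + 1 : Nat) + 1) 1
        = PySem.List.pyRange 1 ((n : Int) + 1) 1 ++ [(n : Int) + 1] := by
      have := PySem.List.pyRange_one_succ_right (a := 1) (b := (n : Int) + 1) (by omega)
      push_cast
      exact this
    have hget : PySem.List.pyGet? genotype ((n : Int) + 1) = some (genotype.getD (n + 1) 0) := by
      rw [List.getD_eq_getElem genotype 0 hlen]
      have := PySem.List.pyGet?_eq_some_getElem (xs := genotype) (i := (n : Int) + 1)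
        (by omega) (by exact_mod_cast hlen)
      simpa using this
    have hval := hsym (n + 1) (by omega) le_rfl
    rw [show ((n : Nat) + 1 : Nat) = n + 1 from rfl] at *
    rw [hrange, List.foldl_append, ← ih hlen' hsym']
    show phaseGenotypeRecurseGo genotype (n + 1)
      = pvStepB genotype (phaseGenotypeRecurseGo genotype n) ((n : Int) + 1)
    simp only [phaseGenotypeRecurseGo, pvStepB, hget]
    rcases hval with h | h | h <;> rw [h] <;> norm_num
    · simpa using PySem.List.foldl_append_singleton_eq_map
        (f := fun h => h ++ [(0:Int)]) (l := phaseGenotypeRecurseGo genotype n) (acc := [])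
    · simpa using PySem.List.foldl_append_eq_flatMap
        (g := fun h => [h ++ [(1:Int)], h ++ [0]]) (l := phaseGenotypeRecurseGo genotype n) (acc := [])
    · simpa using PySem.List.foldl_append_singleton_eq_map
        (f := fun h => h ++ [(1:Int)]) (l := phaseGenotypeRecurseGo genotype n) (acc := [])

-- ===== VERDICT (by name: the statement is the Claim_ definition above) =====
theorem phaseGenotypeRecurse_spec : Claim_equal_phaseGenotypeRecurse := by
  intro genotype i _ hpre
  obtain ⟨hi0, hilen, hsym⟩ := hpre
  have hnotneg : ¬ i < 0 := by omega
  have hlen0 : 0 < genotype.length := by omega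
  have h0 : PySem.List.pyGet? genotype 0 = some (genotype.getD 0 0) := by
    rw [List.getD_eq_getElem genotype 0 hlen0]
    have := PySem.List.pyGet?_eq_some_getElem (xs := genotype) (i := 0) le_rfl
      (by exact_mod_cast hlen0)
    simpa using this
  have hcast : i = ((i.toNat : Nat) : Int) := by omega
  unfold Spec_phaseGenotypeRecurse
  rw [phaseGenotypeRecurse_alt_eq_fold genotype i hnotneg _ h0]
  have hmain := pvMain genotype i.toNat (by omega)
    (fun j h1 h2 => by
      have := hsym j (List.mem_range.mpr (by omega))
      rcases this with h | h
      · omega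
      · exact h)
  simp only [phaseGenotypeRecurse, hnotneg, if_false]
  rw [hmain, h0, ← hcast]
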